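-- pv_equiv track=rewrite | github.com/j-enriquez/corgibrowser | corgibrowser/corgi_webscraping/batch_scraper_processor.py | review_if_url_path_is_allowed
-- ===== SOURCE A (Python) =====
-- def review_if_url_path_is_allowed(url):
--     disallowed_words = {
--         "whatsapp.com",
--         "facebook.com",
--         "instagram.com",
--         "twitter.com",
--         "tiktok.com",
--         "wa.me",
--         "javascript:popup",
--         "mailto:"
--     }
--
--     url_lower = url.lower()  # Lowercase the URL once
--     return not any( disallowed in url_lower for disallowed in disallowed_words )
-- ===== SOURCE B (Python) =====
-- def review_if_url_path_is_allowed(url):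
--     disallowed_words = (
--         "whatsapp.com",
--         "facebook.com",
--         "instagram.com",
--         "twitter.com",
--         "tiktok.com",
--         "wa.me",
--         "javascript:popup",
--         "mailto:",
--     )
--     u = url.lower()
--     # single left-to-right pass: at each position, test whether any needle starts here
--     for i in range(len(u)):
--         for w in disallowed_words:
--             if u.startswith(w, i):
--                 return False
--     return True
-- ===== Notes on version B (the rewrite author's own statement) =====
-- stated objective: alternative
-- what changed: Replaces the per-needle repeated membership substring scans with one position-major left-to-right pass over the lowered URL that tests startswith for each needle at each position.
import Mathlib
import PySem

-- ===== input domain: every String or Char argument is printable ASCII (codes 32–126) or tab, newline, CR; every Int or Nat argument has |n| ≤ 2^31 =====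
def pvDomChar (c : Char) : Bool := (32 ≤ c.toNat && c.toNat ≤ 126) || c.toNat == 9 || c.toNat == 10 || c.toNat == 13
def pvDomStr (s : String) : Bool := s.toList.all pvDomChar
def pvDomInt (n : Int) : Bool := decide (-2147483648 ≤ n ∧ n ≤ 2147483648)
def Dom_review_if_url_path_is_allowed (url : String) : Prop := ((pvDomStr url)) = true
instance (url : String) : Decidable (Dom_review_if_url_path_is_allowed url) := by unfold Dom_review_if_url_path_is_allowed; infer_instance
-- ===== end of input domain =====

-- B replaces A's per-needle repeated membership scans with one position-major left-to-right pass (alternative decomposition, same cost class).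

-- ===== PORT A =====
-- A's set literal of disallowed words, as a list of its distinct elements
def disallowedWordsA : List String :=
  ["whatsapp.com", "facebook.com", "instagram.com", "twitter.com",
   "tiktok.com", "wa.me", "javascript:popup", "mailto:"]

def review_if_url_path_is_allowed (url : String) : Bool :=
  let url_lower := PySem.Str.lower url
  !(disallowedWordsA.any (fun disallowed => PySem.Str.isIn disallowed url_lower))

-- ===== PORT B =====
def disallowedWordsB : List String :=
  ["whatsapp.com", "facebook.com", "instagram.com", "twitter.com",
   "tiktok.com", "wa.me", "javascript:popup", "mailto:"]

-- B's loop over positions i of the lowered url, as recursion on the suffix u[i:]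
def altScan (s : List Char) : Bool :=
  match s with
  | [] => true
  | _ :: t =>
      if disallowedWordsB.any (fun w => PySem.Chars.startswith s w.toList) then
        false
      else
        altScan t

def review_if_url_path_is_allowed_alt (url : String) : Bool :=
  altScan (PySem.Str.lower url).toList

-- ===== PRECONDITION & SPEC =====
def Spec_review_if_url_path_is_allowed (url : String) (out : Bool) : Prop := out = review_if_url_path_is_allowed_alt url
instance (url : String) (out : Bool) : Decidable (Spec_review_if_url_path_is_allowed url out) := by unfold Spec_review_if_url_path_is_allowed; infer_instance

-- ===== CLAIM (what is proved, stated in full; the proofs are below) =====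
def Claim_equal_review_if_url_path_is_allowed : Prop := ∀ (url : String), Dom_review_if_url_path_is_allowed url → Spec_review_if_url_path_is_allowed url (review_if_url_path_is_allowed url)

-- ===== LEMMAS AND PROOFS =====

-- 'sub in (c::t)' splits into a match at position 0 plus a match in the tail
theorem isIn_cons_eq (w : List Char) (c : Char) (t : List Char) :
    PySem.Chars.isIn w (c :: t) = (PySem.Chars.startswith (c :: t) w || PySem.Chars.isIn w t) := by
  rw [Bool.eq_iff_iff]
  simp only [Bool.or_eq_true, PySem.Chars.isIn_iff_infix, PySem.Chars.startswith_iff]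
  exact List.infix_cons_iff

theorem altScan_eq (s : List Char) :
    altScan s = !(disallowedWordsB.any (fun w => PySem.Chars.isIn w.toList s)) := by
  induction s with
  | nil => decide
  | cons c t ih =>
      rw [altScan]
      by_cases h : disallowedWordsB.any (fun w => PySem.Chars.startswith (c :: t) w.toList) = true
      · simp only [h, if_true]
        rcases List.any_eq_true.mp h with ⟨w, hw, hsw⟩
        have : disallowedWordsB.any (fun w => PySem.Chars.isIn w.toList (c :: t)) = true :=
          List.any_eq_true.mpr ⟨w, hw, by rw [isIn_cons_eq, hsw]; rfl⟩
        simp [this]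
      · rw [if_neg h, ih]
        have hall : ∀ w ∈ disallowedWordsB, PySem.Chars.startswith (c :: t) w.toList = false := by
          intro w hw
          by_contra hne
          exact h (List.any_eq_true.mpr ⟨w, hw, by simpa using hne⟩)
        have heq : disallowedWordsB.any (fun w => PySem.Chars.isIn w.toList (c :: t))
            = disallowedWordsB.any (fun w => PySem.Chars.isIn w.toList t) := by
          rw [Bool.eq_iff_iff]
          simp only [List.any_eq_true]
          constructor
          · rintro ⟨w, hw, hi⟩
            rw [isIn_cons_eq, hall w hw, Bool.false_or] at hi
            exact ⟨w, hw, hi⟩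
          · rintro ⟨w, hw, hi⟩
            exact ⟨w, hw, by rw [isIn_cons_eq, hall w hw, Bool.false_or]; exact hi⟩
        rw [heq]

-- ===== VERDICT (by name: the statement is the Claim_ definition above) =====
theorem review_if_url_path_is_allowed_spec : Claim_equal_review_if_url_path_is_allowed := by
  intro url _
  unfold Spec_review_if_url_path_is_allowed review_if_url_path_is_allowed review_if_url_path_is_allowed_alt
  rw [altScan_eq]
  simp [disallowedWordsA, disallowedWordsB]
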